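-- pv_equiv track=rewrite | github.com/yimuguo/LPR | Sep_12th/python_revised/LPR_20140912.py | parse
-- ===== SOURCE A (Python) =====
-- def parse(s):
-- 	i = 0
-- 	while (len(s) > 0 and i < len(s)):
-- 		if s[i] == ',':
-- 			s=s[i+1:]
-- 			i=0
-- 		else: i+=1
-- 	return s
-- ===== SOURCE B (Python) =====
-- def parse(s):
--     # single reverse pass: collect characters until the first ',' seen from the right
--     out = []
--     for c in reversed(s):
--         if c == ',':
--             break
--         out.append(c)
--     return ''.join(reversed(out))
-- ===== Notes on version B (the rewrite author's own statement) =====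
-- stated objective: faster
-- what changed: Replaces A's repeated chop-from-the-left rescanning loop with a single reverse pass that stops at the last comma.
import Mathlib
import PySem

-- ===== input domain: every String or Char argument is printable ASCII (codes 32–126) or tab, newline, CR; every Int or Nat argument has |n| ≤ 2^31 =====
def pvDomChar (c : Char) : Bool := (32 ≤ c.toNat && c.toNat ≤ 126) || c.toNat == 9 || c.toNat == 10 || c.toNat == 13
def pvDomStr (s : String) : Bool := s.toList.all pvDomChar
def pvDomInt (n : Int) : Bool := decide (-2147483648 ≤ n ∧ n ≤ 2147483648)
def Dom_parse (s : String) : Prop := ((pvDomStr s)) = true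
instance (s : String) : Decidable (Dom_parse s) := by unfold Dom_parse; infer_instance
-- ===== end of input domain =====

-- B (one reverse pass) replaces A's quadratic repeated chop-from-the-left loop; return values proved equal.

-- ===== PORT A =====
-- A's while loop: state (s, i); on s[i]=',' chop the prefix and reset i, else advance i.
def parseLoop (l : List Char) (i : Nat) : List Char :=
  if h : i < l.length then
    if l[i] = ',' then parseLoop (l.drop (i + 1)) 0
    else parseLoop l (i + 1)
  else l
termination_by l.length - i
decreasing_by
  · simp; omega
  · omega

def parse (s : String) : String := String.ofList (parseLoop s.toList 0)

-- ===== PORT B =====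
-- Source B: walk reversed(s), stop at the first ',', accumulate (prepending reverses back).
def parseAltLoop : List Char → List Char → List Char
  | [], acc => acc
  | c :: rest, acc => if c = ',' then acc else parseAltLoop rest (c :: acc)

def parse_alt (s : String) : String := String.ofList (parseAltLoop s.toList.reverse [])

-- ===== PRECONDITION & SPEC =====
def Spec_parse (s : String) (out : String) : Prop := out = parse_alt s
instance (s : String) (out : String) : Decidable (Spec_parse s out) := by unfold Spec_parse; infer_instance

-- ===== CLAIM (what is proved, stated in full; the proofs are below) =====
def Claim_equal_parse : Prop := ∀ (s : String), Dom_parse s → Spec_parse s (parse s)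

-- ===== LEMMAS AND PROOFS =====

theorem parseAltLoop_eq (r acc : List Char) :
    parseAltLoop r acc = (r.takeWhile (fun c => c != ',')).reverse ++ acc := by
  induction r generalizing acc with
  | nil => simp [parseAltLoop]
  | cons c rest ih =>
    by_cases hc : c = ','
    · simp [parseAltLoop, hc, List.takeWhile]
    · simp only [parseAltLoop, if_neg hc, ih, List.takeWhile]
      have : (c != ',') = true := by simp [hc]
      rw [this]; simp

theorem takeWhile_append_stop (p : Char → Bool) (a : List Char) (c : Char) (b : List Char)
    (hc : p c = false) : (a ++ c :: b).takeWhile p = a.takeWhile p := by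
  induction a with
  | nil => simp [List.takeWhile, hc]
  | cons x xs ih =>
    by_cases hx : p x
    · simp [List.takeWhile, hx, ih]
    · simp [List.takeWhile, hx]

theorem parseLoop_eq (l : List Char) (i : Nat)
    (hpre : ∀ c ∈ l.take i, c ≠ ',') :
    parseLoop l i = ((l.reverse.takeWhile (fun c => c != ',')).reverse) := by
  by_cases h : i < l.length
  · by_cases hc : l[i] = ','
    · rw [parseLoop, dif_pos h, if_pos hc]
      rw [parseLoop_eq (l.drop (i + 1)) 0 (by simp)]
      have hdec : l.reverse = (l.drop (i + 1)).reverse ++ ',' :: (l.take i).reverse := by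
        have : l = l.take (i + 1) ++ l.drop (i + 1) := (List.take_append_drop _ _).symm
        have ht : l.take (i + 1) = l.take i ++ [l[i]] := by
          rw [List.take_add_one]; simp [List.getElem?_eq_getElem h]
        conv_lhs => rw [this, ht, hc]
        simp
      rw [hdec, takeWhile_append_stop _ _ ',' _ (by simp)]
    · rw [parseLoop, dif_pos h, if_neg hc]
      exact parseLoop_eq l (i + 1) (by
        intro c hcmem
        rw [List.take_add_one, List.getElem?_eq_getElem h] at hcmem
        simp only [Option.toList_some, List.mem_append, List.mem_singleton] at hcmem
        rcases hcmem with hm | hm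
        · exact hpre c hm
        · simpa [hm] using hc)
  · rw [parseLoop, dif_neg h]
    have hall : ∀ c ∈ l, c ≠ ',' := by
      intro c hcmem
      exact hpre c (by rwa [List.take_of_length_le (by omega)])
    have : l.reverse.takeWhile (fun c => c != ',') = l.reverse := by
      apply List.takeWhile_eq_self_iff.mpr
      intro c hcmem
      simp only [List.mem_reverse] at hcmem
      simp [hall c hcmem]
    rw [this, List.reverse_reverse]
termination_by l.length - i
decreasing_by
  · simp; omega
  · omega

-- ===== VERDICT (by name: the statement is the Claim_ definition above) =====
theorem parse_spec : Claim_equal_parse := by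
  intro s _
  unfold Spec_parse parse parse_alt
  rw [parseLoop_eq s.toList 0 (by simp), parseAltLoop_eq]
  simp
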